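-- pv_equiv track=rewrite | github.com/tairmazuz20/task2 | 2.py | initD
-- ===== SOURCE A (Python) =====
-- def copyMatrix(mat, size):
--     newMat = []
--     for i in range(size):
--         rowList = []
--         for j in range(size):
--             rowList.append(mat[i][j])
--         newMat.append(rowList)
--     return newMat
--
-- def initD(matrix, n):
--     mat = copyMatrix(matrix, n)
--     for i in range(n):
--         num = abs(mat[i][i])
--         for j in range(n):
--             (mat[i][j]) = 0
--         (mat[i][i]) = num
--     return mat
-- ===== SOURCE B (Python) =====
-- def initD(matrix, n):
--     # Build each result row by list repetition and concatenation:
--     # i zeros, the absolute diagonal entry, then n-1-i zeros.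
--     result = []
--     for i in range(n):
--         result.append([0] * i + [abs(matrix[i][i])] + [0] * (n - 1 - i))
--     return result
-- ===== Notes on version B (the rewrite author's own statement) =====
-- stated objective: simpler
-- what changed: Instead of copying the whole n*n input and zeroing each row cell-by-cell in a nested loop, B assembles each result row by list repetition and concatenation ([0]*i + [abs(diag)] + [0]*(n-1-i)), reading only the diagonal and using no inner loop and no mutation of a copied matrix.
import Mathlib
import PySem

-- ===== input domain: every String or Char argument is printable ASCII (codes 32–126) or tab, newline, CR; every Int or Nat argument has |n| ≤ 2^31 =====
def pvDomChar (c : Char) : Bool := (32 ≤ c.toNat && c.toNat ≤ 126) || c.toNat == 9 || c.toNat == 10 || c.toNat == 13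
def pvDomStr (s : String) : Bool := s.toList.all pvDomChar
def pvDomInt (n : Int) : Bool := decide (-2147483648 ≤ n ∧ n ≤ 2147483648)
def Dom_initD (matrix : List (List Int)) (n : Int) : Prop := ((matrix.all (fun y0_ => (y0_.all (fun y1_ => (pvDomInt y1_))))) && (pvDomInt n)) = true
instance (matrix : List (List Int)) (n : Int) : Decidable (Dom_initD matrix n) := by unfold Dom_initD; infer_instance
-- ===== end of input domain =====

-- B assembles each result row by list repetition and concatenation
-- ([0]*i + [abs(diag)] + [0]*(n-1-i)) instead of copying the whole input
-- matrix and zeroing it cell-by-cell in place (objective: simpler).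

-- ===== PORT A =====
def copyMatrixA (mat : List (List Int)) (size : Int) : List (List Int) :=
  (PySem.List.pyRange 0 size 1).foldl
    (fun newMat i =>
      newMat ++ [(PySem.List.pyRange 0 size 1).foldl
        (fun rowList j => rowList ++ [PySem.List.pyGetD (PySem.List.pyGetD mat i []) j 0]) []])
    []

def initD (matrix : List (List Int)) (n : Int) : List (List Int) :=
  (PySem.List.pyRange 0 n 1).foldl
    (fun mat i =>
      let num := |PySem.List.pyGetD (PySem.List.pyGetD mat i []) i 0|
      let mat1 := (PySem.List.pyRange 0 n 1).foldl
        (fun m j => PySem.List.pySetD m i (PySem.List.pySetD (PySem.List.pyGetD m i []) j 0)) mat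
      PySem.List.pySetD mat1 i (PySem.List.pySetD (PySem.List.pyGetD mat1 i []) i num))
    (copyMatrixA matrix n)

-- ===== PORT B =====
def initD_alt (matrix : List (List Int)) (n : Int) : List (List Int) :=
  (PySem.List.pyRange 0 n 1).foldl
    (fun result i =>
      result ++ [PySem.List.pyRepeat [(0 : Int)] i
        ++ [|PySem.List.pyGetD (PySem.List.pyGetD matrix i []) i 0|]
        ++ PySem.List.pyRepeat [(0 : Int)] (n - 1 - i)])
    []

-- ===== PRECONDITION & SPEC =====
-- Pre_ excludes exactly the inputs on which Python A raises IndexError: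
-- copyMatrix reads mat[i][j] for all i, j < n, so A needs n rows each of length ≥ n.
def Pre_initD (matrix : List (List Int)) (n : Int) : Prop :=
  n ≤ (matrix.length : Int) ∧ ∀ row ∈ matrix.take n.toNat, n ≤ (row.length : Int)
instance (matrix : List (List Int)) (n : Int) : Decidable (Pre_initD matrix n) := by
  unfold Pre_initD; infer_instance

def pvWitness_initD : List (List Int) × Int := ([[1, -2], [3, -4]], 2)

def Spec_initD (matrix : List (List Int)) (n : Int) (out : List (List Int)) : Prop :=
  out = initD_alt matrix n
instance (matrix : List (List Int)) (n : Int) (out : List (List Int)) : Decidable (Spec_initD matrix n out) := by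
  unfold Spec_initD; infer_instance

-- ===== CLAIM (what is proved, stated in full; the proofs are below) =====
def Claim_equal_initD : Prop := ∀ (matrix : List (List Int)) (n : Int),
  Dom_initD matrix n → Pre_initD matrix n → Spec_initD matrix n (initD matrix n)

-- ===== LEMMAS AND PROOFS =====

-- A's final row i (abs diagonal, zeros elsewhere) and the copied row i, on Nat indices.
def browD (matrix : List (List Int)) (N i : Nat) : List Int :=
  (List.range N).map (fun j => if i = j then |(matrix.getD i []).getD i 0| else 0)

def crowD (matrix : List (List Int)) (N i : Nat) : List Int :=
  (List.range N).map (fun j => (matrix.getD i []).getD j 0)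

theorem flat_single {α β : Type} (f : α → β) (l : List α) :
    (l.map (fun x => [f x])).flatten = l.map f := by
  induction l with
  | nil => rfl
  | cons a l ih => simp [ih]

-- B's padded row for i < N is exactly A's final row i.
theorem padded_eq_browD (matrix : List (List Int)) (N i : Nat) (hi : i < N) :
    List.replicate i (0 : Int) ++ |(matrix.getD i []).getD i 0| :: List.replicate (N - 1 - i) 0
      = browD matrix N i := by
  apply List.ext_getElem
  · simp [browD]; omega
  · intro j h1 h2
    simp only [browD, List.getElem_map, List.getElem_range]
    by_cases hj : j < i
    · rw [List.getElem_append_left (by simpa using hj)]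
      simp; omega
    · rw [List.getElem_append_right (by simpa using hj)]
      simp only [List.length_replicate]
      by_cases hji : j = i
      · subst hji; simp
      · simp only [List.getElem_cons]
        simp [show j - i ≠ 0 by omega, show ¬ i = j by omega]

theorem initD_alt_eq (matrix : List (List Int)) (n : Int) :
    initD_alt matrix n = (List.range n.toNat).map (browD matrix n.toNat) := by
  simp only [initD_alt, PySem.List.pyRange_one]
  rw [List.foldl_map, PySem.List.foldl_append_singleton_eq_map]
  rw [List.nil_append, show (n - 0).toNat = n.toNat by omega]
  apply List.map_congr_left
  intro i hi
  simp only [List.mem_range] at hi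
  have h1 : ((0 : Int) + i).toNat = i := by omega
  have h2 : (n - 1 - ((0 : Int) + i)).toNat = n.toNat - 1 - i := by omega
  rw [PySem.List.pyRepeat_singleton, PySem.List.pyRepeat_singleton, h1, h2]
  simp only [zero_add, PySem.List.pyGetD_natCast]
  rw [List.append_assoc, List.singleton_append]
  exact padded_eq_browD matrix n.toNat i hi

theorem copyMatrixA_eq (matrix : List (List Int)) (n : Int) :
    copyMatrixA matrix n = (List.range n.toNat).map (crowD matrix n.toNat) := by
  simp [copyMatrixA, PySem.List.pyRange_one, List.map_map, Function.comp_def,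
        flat_single, crowD, List.getD]

theorem initD_eq (matrix : List (List Int)) (n : Int) :
    initD matrix n = (List.range n.toNat).foldl
      (fun mat i =>
        let num := |(mat.getD i []).getD i 0|
        let mat1 := (List.range n.toNat).foldl
          (fun m j => m.set i ((m.getD i []).set j 0)) mat
        mat1.set i ((mat1.getD i []).set i num))
      ((List.range n.toNat).map (crowD matrix n.toNat)) := by
  simp [initD, copyMatrixA_eq, PySem.List.pyRange_one, List.foldl_map]

theorem zero_fold (L : Nat) (r : List Int) :
    (List.range L).foldl (fun r j => r.set j 0) r
      = List.replicate (min L r.length) 0 ++ r.drop L := by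
  induction L with
  | zero => simp
  | succ L ih =>
    rw [List.range_succ, List.foldl_append, ih]
    simp only [List.foldl_cons, List.foldl_nil]
    by_cases h : L < r.length
    · have hmin : min L r.length = L := by omega
      have hdrop : r.drop L = r[L] :: r.drop (L + 1) := List.drop_eq_getElem_cons h
      have hmin' : min (L + 1) r.length = L + 1 := by omega
      rw [hmin, hdrop, hmin']
      rw [List.set_append_right L (0 : Int) (by simp)]
      simp only [List.length_replicate, Nat.sub_self, List.set_cons_zero]
      simp [List.replicate_succ' (n := L)]
    · have h1 : min L r.length = r.length := by omega
      have h2 : min (L + 1) r.length = r.length := by omega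
      have h3 : r.drop L = [] := by simp; omega
      have h4 : r.drop (L + 1) = [] := by simp; omega
      rw [h1, h2, h3, h4]
      have hle : (List.replicate r.length (0 : Int)).length ≤ L := by simp; omega
      simp [List.set_eq_of_length_le hle]

theorem row_fold (js : List Nat) (i : Nat) (m : List (List Int)) :
    js.foldl (fun m j => m.set i ((m.getD i []).set j 0)) m
      = m.set i (js.foldl (fun r j => r.set j 0) (m.getD i [])) := by
  induction js generalizing m with
  | nil =>
    simp only [List.foldl_nil]
    by_cases h : i < m.length
    · rw [List.getD_eq_getElem _ _ h, List.set_getElem_self]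
    · rw [List.set_eq_of_length_le (by omega)]
  | cons j js ih =>
    rw [List.foldl_cons, List.foldl_cons, ih]
    by_cases h : i < m.length
    · rw [List.set_set]
      congr 1
      simp [List.getD_eq_getElem?_getD, List.getElem?_set_self (show i < m.length from h)]
    · have hle : m.length ≤ i := by omega
      simp [List.set_eq_of_length_le hle]

theorem outer_inv (matrix : List (List Int)) (N m : Nat) (hm : m ≤ N) :
    (List.range m).foldl
      (fun mat i =>
        let num := |(mat.getD i []).getD i 0|
        let mat1 := (List.range N).foldl
          (fun m j => m.set i ((m.getD i []).set j 0)) mat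
        mat1.set i ((mat1.getD i []).set i num))
      ((List.range N).map (crowD matrix N))
    = (List.range N).map (fun i => if i < m then browD matrix N i else crowD matrix N i) := by
  induction m with
  | zero => simp
  | succ m ih =>
    have hmN : m < N := by omega
    rw [List.range_succ, List.foldl_append, ih (by omega)]
    simp only [List.foldl_cons, List.foldl_nil]
    set mat := (List.range N).map (fun i => if i < m then browD matrix N i else crowD matrix N i) with hmat
    have hlen : mat.length = N := by simp [hmat]
    have hrow : mat.getD m [] = crowD matrix N m := by
      rw [hmat, PySem.List.getD_map_range _ _ _ _ hmN]
      simp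
    have hrlen : (crowD matrix N m).length = N := by simp [crowD]
    have hnum : (crowD matrix N m).getD m 0 = (matrix.getD m []).getD m 0 := by
      rw [crowD, PySem.List.getD_map_range _ _ _ _ hmN]
    rw [row_fold, zero_fold, hrow, hrlen]
    have hz : List.replicate (min N N) (0 : Int) ++ (crowD matrix N m).drop N
        = List.replicate N (0 : Int) := by simp [hrlen]
    rw [hz, List.set_set]
    have hget1 : (mat.set m (List.replicate N (0 : Int))).getD m []
        = List.replicate N (0 : Int) := by
      simp [List.getD_eq_getElem?_getD, List.getElem?_set_self (show m < mat.length by omega)]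
    rw [hget1, hnum]
    have hbrow : (List.replicate N (0 : Int)).set m |(matrix.getD m []).getD m 0|
        = browD matrix N m := by
      apply List.ext_getElem
      · simp [browD]
      · intro j h1 h2
        rw [List.getElem_set]
        simp [browD]
    rw [hbrow]
    apply List.ext_getElem
    · simp [hmat]
    · intro j h1 h2
      rw [List.getElem_set]
      have hj : j < N := by simpa using h2
      simp only [hmat, List.getElem_map, List.getElem_range]
      by_cases hmj : m = j
      · subst hmj; simp
      · by_cases hjm : j < m <;> simp [hjm, hmj] <;> omega

-- ===== VERDICT (by name: the statement is the Claim_ definition above) =====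
theorem initD_spec : Claim_equal_initD := by
  intro matrix n _ _
  unfold Spec_initD
  rw [initD_eq, initD_alt_eq, outer_inv matrix n.toNat n.toNat (le_refl _)]
  apply List.map_congr_left
  intro i hi
  simp [List.mem_range] at hi
  simp [hi]
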